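-- pv_equiv track=rewrite | github.com/REDWOLF925/vk_ds | other/data_preprocessing.py | inflow_max_val
-- ===== SOURCE A (Python) =====
-- def inflow_max_val(lst):
--     ans = 0
--     s = 0
--     for i in range(1, len(lst)):
--         diff = lst[i] - lst[i - 1]
--         if diff > 0:
--             s += diff
--             ans = max(ans, s)
--         else:
--             s = 0
--     return ans
-- ===== SOURCE B (Python) =====
-- def inflow_max_val(lst):
--     # Partition the consecutive differences into maximal runs of positive
--     # values; the answer is the largest whole-run sum (0 if no positive run).
--     diffs = [y - x for x, y in zip(lst, lst[1:])]
--     n = len(diffs)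
--     best = 0
--     i = 0
--     while i < n:
--         if diffs[i] <= 0:
--             i += 1
--         else:
--             j = i
--             run_sum = 0
--             while j < n and diffs[j] > 0:
--                 run_sum += diffs[j]
--                 j += 1
--             best = max(best, run_sum)
--             i = j
--     return best
-- ===== Notes on version B (the rewrite author's own statement) =====
-- stated objective: alternative
-- what changed: Instead of one accumulate-and-reset pass keeping a running max at every step, B builds the difference list, partitions it into maximal runs of positive differences, sums each run as a whole and takes the maximum run-sum.
import Mathlib
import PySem

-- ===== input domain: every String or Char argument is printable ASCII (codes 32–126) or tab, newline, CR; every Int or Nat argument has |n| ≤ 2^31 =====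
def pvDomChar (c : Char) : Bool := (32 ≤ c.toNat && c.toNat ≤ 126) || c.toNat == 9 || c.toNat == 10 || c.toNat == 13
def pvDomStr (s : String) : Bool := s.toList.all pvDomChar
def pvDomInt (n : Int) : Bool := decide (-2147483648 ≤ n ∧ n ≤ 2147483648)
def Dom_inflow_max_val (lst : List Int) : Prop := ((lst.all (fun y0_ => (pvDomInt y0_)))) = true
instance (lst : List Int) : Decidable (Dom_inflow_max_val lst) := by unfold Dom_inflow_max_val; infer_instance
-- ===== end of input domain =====

-- B replaces A's accumulate-and-reset scan with a run-partition of the difference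
-- list (maximal positive runs, summed whole); same O(n) cost, different decomposition.

-- ===== PORT A =====
def inflow_max_val (lst : List Int) : Int :=
  ((PySem.List.pyRange 1 lst.length 1).foldl
    (fun (st : Int × Int) i =>
      let diff := PySem.List.pyGetD lst i 0 - PySem.List.pyGetD lst (i - 1) 0
      if diff > 0 then
        let s := st.2 + diff
        (max st.1 s, s)
      else (st.1, 0)) ((0 : Int), (0 : Int))).1

-- ===== PORT B =====
-- the outer while loop of Source B: skip a non-positive difference, else take the
-- whole maximal positive run (inner while = takeWhile/sum), keep the best run-sum
def pvRunsMax : List Int → Int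
  | [] => 0
  | d :: ds =>
    if d ≤ 0 then pvRunsMax ds
    else
      max (pvRunsMax ((d :: ds).dropWhile (fun x => decide (0 < x))))
        (((d :: ds).takeWhile (fun x => decide (0 < x))).foldl (· + ·) 0)
termination_by l => l.length
decreasing_by
  · exact Nat.lt_succ_self _
  · rw [List.dropWhile_cons_of_pos (by simp; omega)]
    exact Nat.lt_succ_of_le (List.length_dropWhile_le _ _)

def inflow_max_val_alt (lst : List Int) : Int :=
  let diffs := (lst.zip (PySem.List.slice lst (some 1) none)).map (fun p => p.2 - p.1)
  pvRunsMax diffs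

-- ===== PRECONDITION & SPEC =====
def Spec_inflow_max_val (lst : List Int) (out : Int) : Prop := out = inflow_max_val_alt lst
instance (lst : List Int) (out : Int) : Decidable (Spec_inflow_max_val lst out) := by unfold Spec_inflow_max_val; infer_instance

-- ===== CLAIM (what is proved, stated in full; the proofs are below) =====
def Claim_equal_inflow_max_val : Prop := ∀ (lst : List Int), Dom_inflow_max_val lst → Spec_inflow_max_val lst (inflow_max_val lst)

-- ===== LEMMAS AND PROOFS =====

-- A's loop body over one difference value
def pvStep (st : Int × Int) (d : Int) : Int × Int :=
  if d > 0 then (max st.1 (st.2 + d), st.2 + d) else (st.1, 0)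

-- A's loop as structural recursion over the difference list
def pvLoopA (ans s : Int) : List Int → Int
  | [] => ans
  | d :: ds => if d > 0 then pvLoopA (max ans (s + d)) (s + d) ds else pvLoopA ans 0 ds

lemma pvLoopA_eq_foldl (L : List Int) : ∀ ans s, pvLoopA ans s L = (L.foldl pvStep (ans, s)).1 := by
  induction L with
  | nil => intro ans s; rfl
  | cons d ds ih =>
    intro ans s
    by_cases h : d > 0 <;> simp [pvLoopA, pvStep, h, ih]

lemma pvLoopA_nonneg_mono (L : List Int) : ∀ ans s, ans ≤ pvLoopA ans s L := by
  induction L with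
  | nil => intro ans s; exact le_refl _
  | cons d ds ih =>
    intro ans s
    by_cases h : d > 0
    · simp only [pvLoopA, h, if_pos]
      exact le_trans (le_max_left _ _) (ih _ _)
    · simp only [pvLoopA, if_neg (by omega : ¬ d > 0)]
      exact ih _ _

lemma pvLoopA_maxOut (L : List Int) : ∀ ans s, 0 ≤ ans → pvLoopA ans s L = max ans (pvLoopA 0 s L) := by
  induction L with
  | nil => intro ans s h; simp [pvLoopA]; omega
  | cons d ds ih =>
    intro ans s h
    by_cases hd : d > 0
    · simp only [pvLoopA, hd, if_pos]
      rw [ih (max ans (s + d)) (s + d) (by omega), ih (max 0 (s + d)) (s + d) (by omega)]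
      have h0 : (0 : Int) ≤ pvLoopA 0 (s + d) ds := pvLoopA_nonneg_mono ds 0 (s + d)
      omega
    · simp only [pvLoopA, if_neg (by omega : ¬ d > 0)]
      exact ih ans 0 h

lemma pvLoopA_run (t : List Int) (hne : t ≠ []) (hpos : ∀ x ∈ t, 0 < x) :
    ∀ r ans s, pvLoopA ans s (t ++ r) = pvLoopA (max ans (s + t.foldl (· + ·) 0)) (s + t.foldl (· + ·) 0) r := by
  induction t with
  | nil => exact absurd rfl hne
  | cons d t' ih =>
    intro r ans s
    have hd : 0 < d := hpos d (List.mem_cons_self)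
    by_cases ht' : t' = []
    · subst ht'
      simp [pvLoopA, hd]
    · have hpos' : ∀ x ∈ t', 0 < x := fun x hx => hpos x (List.mem_cons_of_mem _ hx)
      have hsum : 0 < t'.sum := List.sum_pos t' hpos' ht'
      have e1 : (d :: t').foldl (· + ·) 0 = d + t'.sum := by
        simpa using PySem.List.foldl_add t' (fun x => x) d
      have e2 : t'.foldl (· + ·) 0 = t'.sum := by
        simpa using PySem.List.foldl_add t' (fun x => x) 0
      simp only [List.cons_append, pvLoopA, hd, if_pos]
      rw [ih ht' hpos' r (max ans (s + d)) (s + d), e1, e2]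
      have : max (max ans (s + d)) (s + d + t'.sum) = max ans (s + (d + t'.sum)) := by omega
      rw [this]
      ring_nf

lemma pvLoopA_eq_runsMax_aux : ∀ (n : Nat) (L : List Int), L.length ≤ n → pvLoopA 0 0 L = pvRunsMax L := by
  intro n
  induction n with
  | zero =>
    intro L hL
    have : L = [] := List.eq_nil_of_length_eq_zero (Nat.le_zero.mp hL)
    subst this; simp [pvLoopA, pvRunsMax]
  | succ n ihn =>
    intro L hL
    cases L with
    | nil => simp [pvLoopA, pvRunsMax]
    | cons d ds =>
      by_cases hle : d ≤ 0
      · rw [show pvRunsMax (d :: ds) = pvRunsMax ds by simp only [pvRunsMax]; rw [if_pos hle]]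
        rw [show pvLoopA 0 0 (d :: ds) = pvLoopA 0 0 ds by
          simp only [pvLoopA, if_neg (by omega : ¬ d > 0)]]
        exact ihn ds (by simpa using Nat.lt_succ_iff.mp (Nat.lt_of_lt_of_le (Nat.lt_succ_self _) hL))
      · have hd : 0 < d := by omega
        set t := (d :: ds).takeWhile (fun x => decide (0 < x)) with ht
        set r := (d :: ds).dropWhile (fun x => decide (0 < x)) with hr
        have hsplit : t ++ r = d :: ds := List.takeWhile_append_dropWhile
        have htne : t ≠ [] := by
          rw [ht]; simp [hd]
        have htpos : ∀ x ∈ t, 0 < x := by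
          intro x hx
          have := List.mem_takeWhile_imp hx
          simpa using this
        have hSpos : 0 < t.foldl (· + ·) 0 := by
          have : t.foldl (· + ·) 0 = t.sum := by simpa using PySem.List.foldl_add t (fun x => x) 0
          rw [this]
          exact List.sum_pos t htpos htne
        have hrlen : r.length ≤ n := by
          have : r = ds.dropWhile (fun x => decide (0 < x)) := by
            rw [hr, List.dropWhile_cons_of_pos (by simp [hd])]
          rw [this]
          exact Nat.le_trans (List.length_dropWhile_le _ _) (by simpa using Nat.succ_le_succ_iff.mp hL)
        have ih : pvLoopA 0 0 r = pvRunsMax r := ihn r hrlen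
        have hrun := pvLoopA_run t htne htpos r 0 0
        rw [show pvLoopA 0 0 (d :: ds) = pvLoopA 0 0 (t ++ r) by rw [hsplit]]
        rw [hrun]
        simp only [zero_add, max_eq_right (le_of_lt hSpos)]
        have hruns : pvRunsMax (d :: ds) = max (pvRunsMax r) (t.foldl (· + ·) 0) := by
          simp only [pvRunsMax]
          rw [if_neg (by omega : ¬ d ≤ 0)]
        rw [hruns, ← ih]
        cases hcr : r with
        | nil => simp [pvLoopA]; omega
        | cons e r' =>
          have he : ¬ (0 < e) := by
            have hcr' : List.dropWhile (fun x => decide (0 < x)) (d :: ds) = e :: r' := by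
              rw [← hr]; exact hcr
            have w : List.dropWhile (fun x => decide (0 < x)) (d :: ds) ≠ [] := by
              rw [hcr']; simp
            have h1 := List.head_dropWhile_not (fun x => decide (0 < x)) w
            have h2 : (List.dropWhile (fun x => decide (0 < x)) (d :: ds)).head w = e := by
              simp [hcr']
            rw [h2] at h1
            simpa using h1
          simp only [pvLoopA, if_neg (by omega : ¬ e > 0)]
          rw [pvLoopA_maxOut r' _ 0 (le_of_lt hSpos)]
          omega

lemma pvLoopA_eq_runsMax (L : List Int) : pvLoopA 0 0 L = pvRunsMax L :=
  pvLoopA_eq_runsMax_aux L.length L (le_refl _)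

-- index-fold = list-fold
lemma pvFoldl_getD (L : List Int) : ∀ st : Int × Int,
    (List.range L.length).foldl (fun st k => pvStep st (L.getD k 0)) st = L.foldl pvStep st := by
  induction L with
  | nil => intro st; rfl
  | cons a L ih =>
    intro st
    rw [List.length_cons, List.range_succ_eq_map, List.foldl_cons, List.foldl_map]
    simpa using ih (pvStep st a)

lemma pv_bridge (lst : List Int) :
    inflow_max_val lst =
      pvLoopA 0 0 ((lst.zip (lst.drop 1)).map (fun p => p.2 - p.1)) := by
  set D := (lst.zip (lst.drop 1)).map (fun p => p.2 - p.1) with hD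
  have hlen : D.length = lst.length - 1 := by
    simp [hD]
  rw [pvLoopA_eq_foldl, ← pvFoldl_getD]
  unfold inflow_max_val
  rw [PySem.List.pyRange_one, List.foldl_map]
  have hcast : ((lst.length : Int) - 1).toNat = D.length := by
    rw [hlen]; omega
  rw [hcast]
  apply congrArg
  apply PySem.List.foldl_congr_mem
  intro st k hk
  have hk' : k < D.length := List.mem_range.mp hk
  have hk2 : k + 1 < lst.length := by omega
  have hidx1 : (1 : Int) + (k : Int) = ((k + 1 : Nat) : Int) := by push_cast; ring
  have hidx2 : (1 : Int) + (k : Int) - 1 = ((k : Nat) : Int) := by omega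
  have hDk : D.getD k 0 = lst.getD (k + 1) 0 - lst.getD k 0 := by
    have h1 : D[k] = lst[k + 1] - lst[k] := by
      simp [hD, List.getElem_zip]
    rw [List.getD_eq_getElem _ _ hk', h1,
      List.getD_eq_getElem _ _ hk2, List.getD_eq_getElem _ _ (by omega : k < lst.length)]
  rw [hidx2, hidx1, PySem.List.pyGetD_natCast, PySem.List.pyGetD_natCast, ← hDk]
  rfl

-- ===== VERDICT (by name: the statement is the Claim_ definition above) =====
theorem inflow_max_val_spec : Claim_equal_inflow_max_val := by
  intro lst _
  unfold Spec_inflow_max_val inflow_max_val_alt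
  rw [PySem.List.slice_from_one, pv_bridge, ← List.drop_one, pvLoopA_eq_runsMax]
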